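-- pv_equiv track=rewrite | github.com/HaoWuLab-Bioinformatics/iPro-WAEL | predict.py | Mismatch
-- ===== SOURCE A (Python) =====
-- import itertools
--
-- def kmerArray(sequence, k):
--     kmer = []
--     for i in range(len(sequence) - k + 1):
--         kmer.append(sequence[i:i + k])
--     return kmer
--
-- def mismatch_count(seq1, seq2):
--     mismatch = 0
--     for i in range(min([len(seq1), len(seq2)])):
--         if seq1[i] != seq2[i]:
--             mismatch += 1
--     return mismatch
--
-- def Mismatch(sequence_list):
--     k = 5
--     m = 1
--     NN = 'ACGT'
--
--     encoding = []
--     template_dict = {}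
--     for kmer in itertools.product(NN, repeat=k):
--         template_dict[''.join(kmer)] = 0
--
--     for elem in sequence_list:
--         sequence = elem
--         kmers = kmerArray(sequence, k)
--         tmp_dict = template_dict.copy()
--         for kmer in kmers:
--             for key in tmp_dict:
--                 if mismatch_count(kmer, key) <= m:
--                     tmp_dict[key] += 1
--         code = [tmp_dict[key] for key in sorted(tmp_dict.keys())]
--         encoding.append(code)
--     return encoding
-- ===== SOURCE B (Python) =====
-- def exact_indices(kmer, base):
--     # index of kmer itself in the sorted ACGT**len(kmer) table, as a one-element
--     # list, or [] if kmer contains a letter outside ACGT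
--     if kmer == '':
--         return [0]
--     d = base.get(kmer[0])
--     if d is None:
--         return []
--     w = 4 ** (len(kmer) - 1)
--     return [d * w + t for t in exact_indices(kmer[1:], base)]
--
--
-- def neighbor_indices(kmer, base):
--     # indices of every ACGT word of the same length within Hamming distance <= 1
--     if kmer == '':
--         return [0]
--     d = base.get(kmer[0])
--     w = 4 ** (len(kmer) - 1)
--     res = []
--     for c in range(4):
--         if d is not None and c == d:
--             res += [c * w + t for t in neighbor_indices(kmer[1:], base)]
--         else:
--             res += [c * w + t for t in exact_indices(kmer[1:], base)]
--     return res
--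
--
-- def Mismatch(sequence_list):
--     k = 5
--     base = {'A': 0, 'C': 1, 'G': 2, 'T': 3}
--     encoding = []
--     for sequence in sequence_list:
--         counts = [0] * (4 ** k)
--         for i in range(len(sequence) - k + 1):
--             for t in neighbor_indices(sequence[i:i + k], base):
--                 counts[t] += 1
--         encoding.append(counts)
--     return encoding
-- ===== Notes on version B (the rewrite author's own statement) =====
-- stated objective: faster
-- what changed: Instead of testing every 5-mer of the sequence against all 1024 ACGT keys with a character-by-character mismatch count, B enumerates for each 5-mer exactly the indices of its Hamming-distance-<=1 ACGT neighbours (at most 16) by base-4 index arithmetic and increments those slots of a flat 1024-cell count array.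
import Mathlib
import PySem

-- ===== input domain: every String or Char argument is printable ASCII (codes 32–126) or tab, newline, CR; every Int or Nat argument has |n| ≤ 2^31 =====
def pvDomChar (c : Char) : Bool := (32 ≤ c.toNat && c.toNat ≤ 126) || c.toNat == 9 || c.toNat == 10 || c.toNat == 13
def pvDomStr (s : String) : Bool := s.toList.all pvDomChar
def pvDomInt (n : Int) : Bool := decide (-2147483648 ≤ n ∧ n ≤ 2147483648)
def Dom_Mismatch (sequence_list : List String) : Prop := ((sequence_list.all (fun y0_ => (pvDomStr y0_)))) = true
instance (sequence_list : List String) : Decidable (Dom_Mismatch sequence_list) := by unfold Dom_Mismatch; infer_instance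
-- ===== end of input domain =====

-- B replaces A's scan of all 1024 ACGT 5-mer keys per k-mer by directly generating the
-- ≤ 16 Hamming-distance-≤1 neighbour indices of each k-mer (objective: faster).

-- ===== PORT A =====
-- strings are handled on the List Char side (PySem.Chars conventions); 'ACGT' is its char list
def NN : List Char := ['A', 'C', 'G', 'T']

def kmerArray (sequence : List Char) (k : Int) : List (List Char) :=
  (PySem.List.pyRange 0 (PySem.List.len sequence - k + 1) 1).foldl
    (fun kmer i => kmer ++ [PySem.List.slice sequence (some i) (some (i + k))]) []

-- seq1[i] / seq2[i]: i is always in range (i < min of the lengths), so pyGetD is exact;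
-- min([a, b]) on the two-element list is ported as min a b (exact)
def mismatch_count (seq1 seq2 : List Char) : Int :=
  (PySem.List.pyRange 0 (min (PySem.List.len seq1) (PySem.List.len seq2)) 1).foldl
    (fun mismatch i =>
      if PySem.List.pyGetD seq1 i ' ' ≠ PySem.List.pyGetD seq2 i ' ' then mismatch + 1 else mismatch)
    0

-- itertools.product(NN, repeat=n) with ''.join applied to each tuple: first letter varies
-- slowest — exactly this recursion
def prodNN : Nat → List (List Char)
  | 0 => [[]]
  | n + 1 => NN.flatMap (fun c => (prodNN n).map (fun t => c :: t))

def Mismatch (sequence_list : List String) : List (List Int) :=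
  let m : Int := 1
  let template_dict : PySem.Dict (List Char) Int :=
    (prodNN 5).foldl (fun d kmer => d.insert kmer 0) PySem.Dict.empty
  sequence_list.foldl (fun encoding elem =>
    let sequence := elem.toList
    let kmers := kmerArray sequence 5
    let tmp_dict := kmers.foldl (fun tmp kmer =>
      tmp.keys.foldl (fun tmp' key =>
        if mismatch_count kmer key ≤ m then tmp'.modify key 0 (· + 1) else tmp') tmp) template_dict
    let code := (PySem.List.sorted tmp_dict.keys (fun x => x)).map (fun key => tmp_dict.getD key 0)
    encoding ++ [code]) []

-- ===== PORT B =====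
-- base.get(c) for base = {'A': 0, 'C': 1, 'G': 2, 'T': 3}
def base_get (c : Char) : Option Int :=
  if c = 'A' then some 0 else if c = 'C' then some 1
  else if c = 'G' then some 2 else if c = 'T' then some 3 else none

def exact_indices : List Char → List Int
  | [] => [0]
  | c :: rest =>
    match base_get c with
    | none => []
    | some d => (exact_indices rest).map (fun t => d * (4 : Int) ^ rest.length + t)

def neighbor_indices : List Char → List Int
  | [] => [0]
  | c :: rest =>
    let d := base_get c
    let w : Int := (4 : Int) ^ rest.length
    let nr := neighbor_indices rest
    let er := exact_indices rest
    (PySem.List.pyRange 0 4 1).foldl (fun res cc =>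
      res ++ (if d = some cc then nr.map (fun t => cc * w + t)
              else er.map (fun t => cc * w + t))) []

-- counts[t] += 1 is in-range (every t is a valid index), so pySetD/pyGetD are exact
def Mismatch_alt (sequence_list : List String) : List (List Int) :=
  let k : Int := 5
  sequence_list.foldl (fun encoding elem =>
    let sequence := elem.toList
    let counts := (PySem.List.pyRange 0 (PySem.List.len sequence - k + 1) 1).foldl
      (fun counts i =>
        (neighbor_indices (PySem.List.slice sequence (some i) (some (i + k)))).foldl
          (fun cs t => PySem.List.pySetD cs t (PySem.List.pyGetD cs t 0 + 1)) counts)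
      (List.replicate (4 ^ 5) 0)
    encoding ++ [counts]) []

-- ===== PRECONDITION & SPEC =====
def Spec_Mismatch (sequence_list : List String) (out : List (List Int)) : Prop := out = Mismatch_alt sequence_list
instance (sequence_list : List String) (out : List (List Int)) : Decidable (Spec_Mismatch sequence_list out) := by unfold Spec_Mismatch; infer_instance

-- ===== CLAIM (what is proved, stated in full; the proofs are below) =====
def Claim_equal_Mismatch : Prop := ∀ (sequence_list : List String), Dom_Mismatch sequence_list → Spec_Mismatch sequence_list (Mismatch sequence_list)

-- ===== LEMMAS AND PROOFS =====

-- digit value of an ACGT letter, and the base-4 index of an ACGT word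
def dig (c : Char) : Int := if c = 'A' then 0 else if c = 'C' then 1 else if c = 'G' then 2 else 3

def encI : List Char → Int
  | [] => 0
  | c :: t => dig c * 4 ^ t.length + encI t

-- number of mismatching positions up to the shorter length
def mismN : List Char → List Char → Nat
  | _, [] => 0
  | [], _ :: _ => 0
  | a :: s, b :: t => (if a ≠ b then 1 else 0) + mismN s t

lemma countP_range_mism (s : List Char) : ∀ (t : List Char),
    (List.range (min s.length t.length)).countP
      (fun k => decide (s.getD k ' ' ≠ t.getD k ' ')) = mismN s t := by
  induction s with
  | nil => intro t; cases t <;> simp [mismN]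
  | cons a s ih =>
    intro t
    cases t with
    | nil => simp [mismN]
    | cons b t =>
      have hmin : min (a :: s).length (b :: t).length = min s.length t.length + 1 := by
        simp [List.length_cons]
      rw [hmin, List.range_succ_eq_map, List.countP_cons, List.countP_map]
      have h2 : ((fun k => decide ((a :: s).getD k ' ' ≠ (b :: t).getD k ' ')) ∘ Nat.succ)
          = (fun k => decide (s.getD k ' ' ≠ t.getD k ' ')) := by
        funext k
        simp
      rw [h2, ih t]
      simp [mismN]
      by_cases hab : a = b <;> simp [hab] <;> omega

lemma mismatch_count_eq (s t : List Char) : mismatch_count s t = (mismN s t : Int) := by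
  unfold mismatch_count
  rw [PySem.List.foldl_ite_add_one
    (p := fun i => PySem.List.pyGetD s i ' ' ≠ PySem.List.pyGetD t i ' ')]
  rw [PySem.List.pyRange_one, List.countP_map]
  have hmin : ((min (PySem.List.len s) (PySem.List.len t)) - 0).toNat = min s.length t.length := by
    simp only [PySem.List.len_eq]
    omega
  rw [hmin]
  have h2 : ((fun i => decide (PySem.List.pyGetD s i ' ' ≠ PySem.List.pyGetD t i ' ')) ∘ (fun k : Nat => (0 : Int) + ↑k))
      = (fun k : Nat => decide (s.getD k ' ' ≠ t.getD k ' ')) := by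
    funext k
    simp
  rw [h2, countP_range_mism s t]
  omega

lemma mem_prodNN {n : Nat} {q : List Char} (h : q ∈ prodNN n) :
    q.length = n ∧ ∀ c ∈ q, c ∈ NN := by
  induction n generalizing q with
  | zero => simp [prodNN] at h; simp [h]
  | succ n ih =>
    simp only [prodNN, List.mem_flatMap, List.mem_map] at h
    obtain ⟨c, hc, t, ht, rfl⟩ := h
    obtain ⟨hl, hall⟩ := ih ht
    refine ⟨by simp [hl], ?_⟩
    intro x hx
    rcases List.mem_cons.mp hx with rfl | hx
    · exact hc
    · exact hall x hx

lemma len_mem_prodNN {n : Nat} {q : List Char} (h : q ∈ prodNN n) : q.length = n :=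
  (mem_prodNN h).1

lemma map_encI_prodNN (n : Nat) :
    (prodNN n).map encI = (List.range (4 ^ n)).map (fun k : Nat => (k : Int)) := by
  induction n with
  | zero => simp [prodNN, encI]
  | succ n ih =>
    have hmap : ∀ c : Char, ((prodNN n).map (fun t => c :: t)).map encI
        = (List.range (4 ^ n)).map (fun k : Nat => dig c * 4 ^ n + (k : Int)) := by
      intro c
      rw [List.map_map]
      have : ∀ t ∈ prodNN n, (encI ∘ (fun t => c :: t)) t = (fun t => dig c * 4 ^ n + encI t) t := by
        intro t ht
        simp [Function.comp_def, encI, len_mem_prodNN ht]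
      rw [List.map_congr_left this,
        show (fun t => dig c * 4 ^ n + encI t) = ((fun x => dig c * 4 ^ n + x) ∘ encI) from rfl,
        ← List.map_map, ih, List.map_map]
      rfl
    have hpow : 4 ^ (n + 1) = 4 ^ n + (4 ^ n + (4 ^ n + 4 ^ n)) := by ring
    rw [prodNN]
    show (NN.flatMap (fun c => (prodNN n).map (fun t => c :: t))).map encI = _
    rw [NN, List.flatMap_cons, List.flatMap_cons, List.flatMap_cons, List.flatMap_cons,
      List.flatMap_nil, List.append_nil, List.map_append, List.map_append, List.map_append,
      hmap, hmap, hmap, hmap, hpow, List.range_add, List.range_add, List.range_add]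
    simp only [List.map_append, List.map_map]
    congr 1
    · apply List.map_congr_left; intro k hk; simp [dig]
    congr 1
    · apply List.map_congr_left; intro k hk
      simp [Function.comp_def, dig]; try push_cast; try ring
    congr 1
    · apply List.map_congr_left; intro k hk
      simp [Function.comp_def, dig]; try push_cast; try ring
    · apply List.map_congr_left; intro k hk
      simp [Function.comp_def, dig]; try push_cast; try ring

lemma length_prodNN (n : Nat) : (prodNN n).length = 4 ^ n := by
  have := congrArg List.length (map_encI_prodNN n)
  simpa using this

lemma nodup_prodNN (n : Nat) : (prodNN n).Nodup := by
  apply List.Nodup.of_map encI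
  rw [map_encI_prodNN]
  exact (List.nodup_range).map (fun a b => by exact_mod_cast id)

lemma pairwise_lt_prodNN (n : Nat) : (prodNN n).Pairwise (· < ·) := by
  induction n with
  | zero => simp [prodNN]
  | succ n ih =>
    rw [prodNN, List.pairwise_flatMap]
    constructor
    · intro c _
      rw [List.pairwise_map]
      exact ih.imp (fun h => List.cons_lt_cons_iff.mpr (Or.inr ⟨rfl, h⟩))
    · have hNN : NN.Pairwise (· < ·) := by decide
      exact hNN.imp_of_mem (by
        intro c c' hc hc' hlt x hx y hy
        simp only [List.mem_map] at hx hy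
        obtain ⟨t, _, rfl⟩ := hx
        obtain ⟨t', _, rfl⟩ := hy
        exact List.cons_lt_cons_iff.mpr (Or.inl hlt))

-- ---- A side: the dict fold computes mismatch-neighbour counts ----

lemma getD_template (l : List (List Char)) : ∀ (d : PySem.Dict (List Char) Int) (q : List Char),
    d.getD q 0 = 0 → ((l.foldl (fun d kmer => d.insert kmer 0) d).getD q 0) = 0 := by
  induction l with
  | nil => intro d q h; simpa using h
  | cons x l ih =>
    intro d q h
    simp only [List.foldl_cons]
    apply ih
    rw [PySem.Dict.getD_insert]
    split <;> simp [h]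

lemma inner_keys (km : List Char) (ks : List (List Char)) :
    ∀ (d : PySem.Dict (List Char) Int), (∀ x ∈ ks, x ∈ d.keys) →
    ((ks.foldl (fun t key =>
        if mismatch_count km key ≤ 1 then t.modify key 0 (· + 1) else t) d)).keys = d.keys := by
  induction ks with
  | nil => intro d _; rfl
  | cons x ks ih =>
    intro d h
    simp only [List.foldl_cons]
    by_cases hx : mismatch_count km x ≤ 1
    · rw [if_pos hx]
      have hk : (d.modify x 0 (· + 1)).keys = d.keys := by
        rw [PySem.Dict.keys_modify, PySem.Dict.keys_insert_of_contains]
        exact (PySem.Dict.contains_iff_mem_keys _ _).mpr (h x (List.mem_cons_self))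
      rw [ih _ (fun y hy => by rw [hk]; exact h y (List.mem_cons_of_mem _ hy)), hk]
    · rw [if_neg hx]
      exact ih _ (fun y hy => h y (List.mem_cons_of_mem _ hy))

lemma inner_getD (km : List Char) (ks : List (List Char)) :
    ∀ (d : PySem.Dict (List Char) Int) (q : List Char),
    ((ks.foldl (fun t key =>
        if mismatch_count km key ≤ 1 then t.modify key 0 (· + 1) else t) d)).getD q 0
      = d.getD q 0 + (if mismatch_count km q ≤ 1 then (ks.count q : Int) else 0) := by
  induction ks with
  | nil => intro d q; simp
  | cons x ks ih =>
    intro d q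
    simp only [List.foldl_cons]
    rw [List.count_cons]
    by_cases hx : mismatch_count km x ≤ 1
    · rw [if_pos hx, ih]
      rw [PySem.Dict.getD_modify]
      by_cases hq : q = x
      · subst hq
        simp only [if_pos hx, beq_self_eq_true, if_pos]
        push_cast; ring
      · rw [if_neg hq]
        have : (x == q) = false := by simp [beq_eq_false_iff_ne]; exact fun e => hq e.symm
        simp [this]
    · rw [if_neg hx, ih]
      by_cases hq : q = x
      · subst hq; simp [hx]
      · have : (x == q) = false := by simp [beq_eq_false_iff_ne]; exact fun e => hq e.symm
        simp [this]

lemma outer_fold (kms : List (List Char)) :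
    ∀ (d : PySem.Dict (List Char) Int) (q : List Char),
    ((kms.foldl (fun tmp kmer =>
        tmp.keys.foldl (fun t key =>
          if mismatch_count kmer key ≤ 1 then t.modify key 0 (· + 1) else t) tmp) d)).keys = d.keys
    ∧ ((kms.foldl (fun tmp kmer =>
        tmp.keys.foldl (fun t key =>
          if mismatch_count kmer key ≤ 1 then t.modify key 0 (· + 1) else t) tmp) d)).getD q 0
      = d.getD q 0
        + (kms.map (fun km => if mismatch_count km q ≤ 1 then (d.keys.count q : Int) else 0)).sum := by
  induction kms with
  | nil => intro d q; simp
  | cons km kms ih =>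
    intro d q
    simp only [List.foldl_cons, List.map_cons, List.sum_cons]
    have hkeys : ((d.keys.foldl (fun t key =>
        if mismatch_count km key ≤ 1 then t.modify key 0 (· + 1) else t) d)).keys = d.keys :=
      inner_keys km d.keys d (fun x hx => hx)
    obtain ⟨ih1, ih2⟩ := ih (d.keys.foldl (fun t key =>
        if mismatch_count km key ≤ 1 then t.modify key 0 (· + 1) else t) d) q
    refine ⟨by rw [ih1, hkeys], ?_⟩
    rw [ih2, inner_getD, hkeys]
    ring

-- ---- B side ----

lemma base_get_mem {c : Char} {d : Int} (h : base_get c = some d) : 0 ≤ d ∧ d < 4 := by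
  unfold base_get at h
  split at h <;> first | (simp at h; omega) | split at h <;>
    first | (simp at h; omega) | split at h <;>
      first | (simp at h; omega) | split at h <;> simp at h <;> omega

lemma encI_bounds : ∀ {q : List Char}, (∀ c ∈ q, c ∈ NN) →
    0 ≤ encI q ∧ encI q < 4 ^ q.length := by
  intro q
  induction q with
  | nil => intro _; simp [encI]
  | cons c t ih =>
    intro h
    have hc : c ∈ NN := h c List.mem_cons_self
    have hd : 0 ≤ dig c ∧ dig c ≤ 3 := by
      fin_cases hc <;> simp [dig]
    obtain ⟨h0, h1⟩ := ih (fun x hx => h x (List.mem_cons_of_mem _ hx))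
    have hw : (0:Int) < 4 ^ t.length := by positivity
    simp only [encI, List.length_cons, pow_succ]
    constructor
    · nlinarith
    · nlinarith

lemma exact_indices_bounds : ∀ (cs : List Char), ∀ t ∈ exact_indices cs, 0 ≤ t ∧ t < 4 ^ cs.length := by
  intro cs
  induction cs with
  | nil => intro t ht; simp [exact_indices] at ht; simp [ht]
  | cons c rest ih =>
    intro t ht
    simp only [exact_indices] at ht
    split at ht
    · simp at ht
    · next d hd =>
      simp only [List.mem_map] at ht
      obtain ⟨u, hu, rfl⟩ := ht
      obtain ⟨hu0, hu1⟩ := ih u hu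
      obtain ⟨hd0, hd1⟩ := base_get_mem hd
      have hw : (0:Int) < 4 ^ rest.length := by positivity
      simp only [List.length_cons, pow_succ]
      constructor
      · nlinarith
      · nlinarith

lemma neighbor_indices_bounds : ∀ (cs : List Char), ∀ t ∈ neighbor_indices cs, 0 ≤ t ∧ t < 4 ^ cs.length := by
  intro cs
  induction cs with
  | nil => intro t ht; simp [neighbor_indices] at ht; simp [ht]
  | cons c rest ih =>
    intro t ht
    have hrange : PySem.List.pyRange 0 4 1 = [0, 1, 2, 3] := rfl
    simp only [neighbor_indices, hrange, List.foldl_cons, List.foldl_nil, List.nil_append,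
      List.mem_append] at ht
    have hw : (0:Int) < 4 ^ rest.length := by positivity
    have key : ∀ (cc : Int), 0 ≤ cc → cc ≤ 3 →
        ∀ x ∈ (if base_get c = some cc then (neighbor_indices rest).map (fun t => cc * 4 ^ rest.length + t)
               else (exact_indices rest).map (fun t => cc * 4 ^ rest.length + t)),
        0 ≤ x ∧ x < 4 ^ (c :: rest).length := by
      intro cc h0 h3 x hx
      have hb : ∃ u, (0 ≤ u ∧ u < 4 ^ rest.length) ∧ x = cc * 4 ^ rest.length + u := by
        split at hx <;> simp only [List.mem_map] at hx <;> obtain ⟨u, hu, rfl⟩ := hx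
        · exact ⟨u, ih u hu, rfl⟩
        · exact ⟨u, exact_indices_bounds rest u hu, rfl⟩
      obtain ⟨u, ⟨hu0, hu1⟩, rfl⟩ := hb
      simp only [List.length_cons, pow_succ]
      constructor
      · nlinarith
      · nlinarith
    rcases ht with (((h | h) | h) | h)
    · exact key 0 (by norm_num) (by norm_num) t h
    · exact key 1 (by norm_num) (by norm_num) t h
    · exact key 2 (by norm_num) (by norm_num) t h
    · exact key 3 (by norm_num) (by norm_num) t h

lemma count_map_shift (L : List Int) (c dx w e : Int) (hw : 0 < w)
    (hL : ∀ t ∈ L, 0 ≤ t ∧ t < w) (he0 : 0 ≤ e) (he1 : e < w) :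
    (L.map (fun t => c * w + t)).count (dx * w + e) = if c = dx then L.count e else 0 := by
  by_cases h : c = dx
  · subst h
    rw [if_pos rfl]
    exact List.count_map_of_injective L _ (fun a b hab => by omega) e
  · rw [if_neg h, List.count_eq_zero]
    intro hmem
    simp only [List.mem_map] at hmem
    obtain ⟨t, ht, heq⟩ := hmem
    obtain ⟨ht0, ht1⟩ := hL t ht
    rcases lt_or_gt_of_ne h with hlt | hlt
    · nlinarith
    · nlinarith

lemma base_get_none {c : Char} (h : base_get c = none) : c ∉ NN := by
  unfold base_get at h
  intro hc
  fin_cases hc <;> simp_all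

lemma base_get_dig {c x : Char} (hx : x ∈ NN) : base_get c = some (dig x) ↔ c = x := by
  fin_cases hx <;> (simp only [base_get, dig]; split_ifs <;> simp_all)

lemma exact_count (km : List Char) : ∀ (q : List Char), km.length = q.length → (∀ c ∈ q, c ∈ NN) →
    (exact_indices km).count (encI q) = if mismN km q = 0 then 1 else 0 := by
  induction km with
  | nil =>
    intro q hlen _
    have : q = [] := List.eq_nil_of_length_eq_zero hlen.symm
    subst this
    simp [exact_indices, encI, mismN]
  | cons c kr ih =>
    intro q hlen hq
    cases q with
    | nil => simp at hlen
    | cons x qr =>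
      have hx : x ∈ NN := hq x List.mem_cons_self
      have hqr : ∀ c ∈ qr, c ∈ NN := fun c hc => hq c (List.mem_cons_of_mem _ hc)
      have hlen' : kr.length = qr.length := by simpa using hlen
      have hw : (0:Int) < 4 ^ kr.length := by positivity
      obtain ⟨he0, he1⟩ := encI_bounds hqr
      simp only [exact_indices]
      cases hbg : base_get c with
      | none =>
        have hne : c ≠ x := fun h => (base_get_none hbg) (h ▸ hx)
        simp [mismN, encI, hne]
      | some d =>
        simp only [encI]
        rw [← hlen'] at he1 ⊢
        rw [count_map_shift _ _ _ _ _ hw (exact_indices_bounds kr) he0 he1]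
        by_cases hcx : c = x
        · have : d = dig x := by
            have := (base_get_dig (c := c) hx).mpr hcx
            rw [hbg] at this; exact (Option.some_inj.mp this)
          rw [if_pos this, ih qr hlen' hqr]
          subst hcx
          simp [mismN]
        · have hd : d ≠ dig x := fun hd => hcx ((base_get_dig hx).mp (hd ▸ hbg))
          rw [if_neg hd]
          simp [mismN, hcx]

lemma neigh_count (km : List Char) : ∀ (q : List Char), km.length = q.length → (∀ c ∈ q, c ∈ NN) →
    (neighbor_indices km).count (encI q) = if mismN km q ≤ 1 then 1 else 0 := by
  induction km with
  | nil =>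
    intro q hlen _
    have : q = [] := List.eq_nil_of_length_eq_zero hlen.symm
    subst this
    simp [neighbor_indices, encI, mismN]
  | cons c kr ih =>
    intro q hlen hq
    cases q with
    | nil => simp at hlen
    | cons x qr =>
      have hx : x ∈ NN := hq x List.mem_cons_self
      have hqr : ∀ c ∈ qr, c ∈ NN := fun c hc => hq c (List.mem_cons_of_mem _ hc)
      have hlen' : kr.length = qr.length := by simpa using hlen
      have hw : (0:Int) < 4 ^ kr.length := by positivity
      obtain ⟨he0, he1⟩ := encI_bounds hqr
      have hrange : PySem.List.pyRange 0 4 1 = [0, 1, 2, 3] := rfl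
      simp only [neighbor_indices, hrange, List.foldl_cons, List.foldl_nil, List.nil_append]
      simp only [encI]
      rw [← hlen'] at he1 ⊢
      rw [List.count_append, List.count_append, List.count_append]
      have hseg : ∀ cc : Int,
          (if base_get c = some cc then (neighbor_indices kr).map (fun t => cc * 4 ^ kr.length + t)
           else (exact_indices kr).map (fun t => cc * 4 ^ kr.length + t)).count
            (dig x * 4 ^ kr.length + encI qr)
          = if cc = dig x then
              (if base_get c = some cc then (neighbor_indices kr).count (encI qr)
               else (exact_indices kr).count (encI qr)) else 0 := by
        intro cc
        split
        · rw [count_map_shift _ _ _ _ _ hw (neighbor_indices_bounds kr) he0 he1]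
        · rw [count_map_shift _ _ _ _ _ hw (exact_indices_bounds kr) he0 he1]
      rw [hseg 0, hseg 1, hseg 2, hseg 3]
      have hd4 : dig x = 0 ∨ dig x = 1 ∨ dig x = 2 ∨ dig x = 3 := by
        fin_cases hx <;> simp [dig]
      rcases hd4 with h | h | h | h
      all_goals {
        rw [h]
        norm_num
        by_cases hc : c = x
        · have hbg : base_get c = some (dig x) := (base_get_dig hx).mpr hc
          rw [h] at hbg
          rw [if_pos hbg, ih qr hlen' hqr]
          simp [mismN, hc]
        · have hbg : ¬ (base_get c = some (dig x)) := fun hh => hc ((base_get_dig hx).mp hh)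
          rw [h] at hbg
          rw [if_neg hbg, exact_count kr qr hlen' hqr]
          simp only [mismN, ne_eq, hc, not_false_eq_true, if_pos]
          split_ifs <;> omega
      }

lemma inc_fold (ts : List Int) : ∀ (cs : List Int), (∀ t ∈ ts, 0 ≤ t ∧ t < (cs.length : Int)) →
    (ts.foldl (fun cs t => PySem.List.pySetD cs t (PySem.List.pyGetD cs t 0 + 1)) cs).length = cs.length
    ∧ ∀ j : Nat, (ts.foldl (fun cs t => PySem.List.pySetD cs t (PySem.List.pyGetD cs t 0 + 1)) cs).getD j 0
        = cs.getD j 0 + (ts.count (j : Int) : Int) := by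
  induction ts with
  | nil => intro cs _; simp
  | cons t ts ih =>
    intro cs h
    obtain ⟨ht0, ht1⟩ := h t List.mem_cons_self
    simp only [List.foldl_cons]
    rw [PySem.List.pySetD_of_nonneg _ _ ht0,
      PySem.List.pyGetD_eq_getElem _ _ ht0 ht1]
    set cs' := cs.set t.toNat (cs[t.toNat] + 1) with hcs'
    have hlen : cs'.length = cs.length := List.length_set
    obtain ⟨ihl, ihg⟩ := ih cs' (fun u hu => by
      rw [hlen]; exact h u (List.mem_cons_of_mem _ hu))
    refine ⟨by rw [ihl, hlen], ?_⟩
    intro j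
    rw [ihg j, List.count_cons]
    by_cases hj : t.toNat = j
    · subst hj
      have hjl : t.toNat < cs.length := by omega
      have hbeq : (t == ((t.toNat : Nat) : Int)) = true := by simp; omega
      rw [hbeq]
      have h1 : cs'.getD t.toNat 0 = cs[t.toNat] + 1 := by
        rw [List.getD_eq_getElem?_getD, hcs', List.getElem?_set, if_pos rfl, if_pos hjl]
        rfl
      have h2 : cs.getD t.toNat 0 = cs[t.toNat] := List.getD_eq_getElem cs 0 hjl
      rw [h1, h2]
      simp
      omega
    · have : (t == (j : Int)) = false := by
        simp only [beq_eq_false_iff_ne, ne_eq]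
        intro he; apply hj; omega
      rw [this]
      have : cs'.getD j 0 = cs.getD j 0 := by
        rw [List.getD_eq_getElem?_getD, List.getD_eq_getElem?_getD, hcs', List.getElem?_set,
          if_neg hj]
      rw [this]
      simp

lemma b_fold (kms : List (List Char)) : ∀ (cs : List Int), (∀ km ∈ kms, km.length = 5) →
    cs.length = 4 ^ 5 →
    (kms.foldl (fun counts km =>
        (neighbor_indices km).foldl
          (fun cs t => PySem.List.pySetD cs t (PySem.List.pyGetD cs t 0 + 1)) counts) cs).length = cs.length
    ∧ ∀ j : Nat, (kms.foldl (fun counts km =>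
        (neighbor_indices km).foldl
          (fun cs t => PySem.List.pySetD cs t (PySem.List.pyGetD cs t 0 + 1)) counts) cs).getD j 0
        = cs.getD j 0 + (kms.map (fun km => ((neighbor_indices km).count (j : Int) : Int))).sum := by
  induction kms with
  | nil => intro cs _ _; simp
  | cons km kms ih =>
    intro cs hk hcs
    simp only [List.foldl_cons, List.map_cons, List.sum_cons]
    have hb : ∀ t ∈ neighbor_indices km, 0 ≤ t ∧ t < (cs.length : Int) := by
      intro t ht
      obtain ⟨h0, h1⟩ := neighbor_indices_bounds km t ht
      rw [hk km List.mem_cons_self] at h1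
      refine ⟨h0, ?_⟩
      rw [hcs]; exact_mod_cast h1
    obtain ⟨il, ig⟩ := inc_fold (neighbor_indices km) cs hb
    obtain ⟨bl, bg⟩ := ih _ (fun x hx => hk x (List.mem_cons_of_mem _ hx)) (by rw [il, hcs])
    refine ⟨by rw [bl, il], ?_⟩
    intro j
    rw [bg j, ig j]
    ring

-- ---- glue ----

set_option maxRecDepth 8000 in
lemma row_eq (sequence : List Char) :
    List.map (fun key => (List.foldl (fun tmp kmer =>
        List.foldl (fun tmp' key => if mismatch_count kmer key ≤ 1 then tmp'.modify key 0 (· + 1) else tmp')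
          tmp tmp.keys)
        (List.foldl (fun d kmer => d.insert kmer 0) (PySem.Dict.empty : PySem.Dict (List Char) Int) (prodNN 5)) (kmerArray sequence 5)).getD key 0)
      (PySem.List.sorted (List.foldl (fun tmp kmer =>
        List.foldl (fun tmp' key => if mismatch_count kmer key ≤ 1 then tmp'.modify key 0 (· + 1) else tmp')
          tmp tmp.keys)
        (List.foldl (fun d kmer => d.insert kmer 0) (PySem.Dict.empty : PySem.Dict (List Char) Int) (prodNN 5)) (kmerArray sequence 5)).keys (fun x => x))
    = List.foldl (fun counts i =>
        List.foldl (fun cs t => PySem.List.pySetD cs t (PySem.List.pyGetD cs t 0 + 1)) counts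
          (neighbor_indices (PySem.List.slice sequence (some i) (some (i + 5)))))
      (List.replicate (4 ^ 5) 0) (PySem.List.pyRange 0 (PySem.List.len sequence - 5 + 1) 1) := by
  have hK : (List.foldl (fun d kmer => d.insert kmer 0)
      (PySem.Dict.empty : PySem.Dict (List Char) Int) (prodNN 5)).keys = prodNN 5 := by
    rw [PySem.Dict.keys_foldl_insert (f := fun _ _ => (0:Int))]
    have h0 : (PySem.Dict.empty : PySem.Dict (List Char) Int).keys = ([] : List (List Char)) := by
      simp
    rw [h0]
    have h1 : PySem.Set.update ([] : List (List Char)) (prodNN 5)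
        = PySem.Set.ofList (prodNN 5) := by
      rw [PySem.Set.ofList_eq_foldl]; rfl
    rw [h1]
    exact PySem.Set.ofList_eq_self_of_nodup _ (nodup_prodNN 5)
  have houter := outer_fold (kmerArray sequence 5)
    (List.foldl (fun d kmer => d.insert kmer 0)
      (PySem.Dict.empty : PySem.Dict (List Char) Int) (prodNN 5))
  have hdec : (fun a b : List Char => List.decidableLT a b)
      = @LinearOrder.toDecidableLT (List Char) List.instLinearOrder := by
    funext a b; exact Subsingleton.elim _ _
  have hsorted : PySem.List.sorted (prodNN 5) (fun x : List Char => x) = prodNN 5 := by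
    rw [show (PySem.List.sorted (prodNN 5) (fun x : List Char => x))
        = @PySem.List.sorted (List Char) (List Char) _
            (@LinearOrder.toDecidableLT (List Char) List.instLinearOrder) (prodNN 5) (fun x => x) false
        from by rw [← hdec]]
    exact PySem.List.sorted_eq_of_perm_of_pairwise_lt _ _ _ (List.Perm.refl _)
      ((pairwise_lt_prodNN 5).imp (fun h => h))
  rw [(houter []).1, hK, hsorted]
  have hTD0 : ∀ q : List Char, (List.foldl (fun d kmer => d.insert kmer 0)
      (PySem.Dict.empty : PySem.Dict (List Char) Int) (prodNN 5)).getD q 0 = 0 :=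
    fun q => getD_template (prodNN 5) PySem.Dict.empty q (by simp)
  have hval : ∀ q ∈ prodNN 5,
      (List.foldl (fun tmp kmer =>
        List.foldl (fun tmp' key => if mismatch_count kmer key ≤ 1 then tmp'.modify key 0 (· + 1) else tmp')
          tmp tmp.keys)
        (List.foldl (fun d kmer => d.insert kmer 0) (PySem.Dict.empty : PySem.Dict (List Char) Int) (prodNN 5)) (kmerArray sequence 5)).getD q 0
      = ((kmerArray sequence 5).map (fun km => if mismatch_count km q ≤ 1 then (1:Int) else 0)).sum := by
    intro q hq
    rw [(houter q).2, hTD0 q]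
    have hc1 : ((List.foldl (fun d kmer => d.insert kmer 0)
        (PySem.Dict.empty : PySem.Dict (List Char) Int) (prodNN 5)).keys).count q = 1 := by
      rw [hK]
      have h1 := List.count_pos_iff.mpr hq
      have h2 := (List.nodup_iff_count_le_one.mp (nodup_prodNN 5)) q
      omega
    simp only [hc1, Nat.cast_one, zero_add]
  rw [List.map_congr_left hval]
  -- B side: rewrite the range fold as a fold over the k-mer list
  have hkm : kmerArray sequence 5 = (PySem.List.pyRange 0 (PySem.List.len sequence - 5 + 1) 1).map
      (fun i => PySem.List.slice sequence (some i) (some (i + 5))) := by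
    unfold kmerArray
    rw [PySem.List.foldl_append_singleton_eq_map, List.nil_append]
  rw [← List.foldl_map (f := fun i => PySem.List.slice sequence (some i) (some (i + 5)))
    (g := fun counts km => (neighbor_indices km).foldl
      (fun cs t => PySem.List.pySetD cs t (PySem.List.pyGetD cs t 0 + 1)) counts), ← hkm]
  have hlen5 : ∀ km ∈ kmerArray sequence 5, km.length = 5 := by
    intro km hkm'
    rw [hkm] at hkm'
    simp only [List.mem_map] at hkm'
    obtain ⟨i, hi, rfl⟩ := hkm'
    rw [PySem.List.mem_pyRange_one] at hi
    obtain ⟨hi0, hi1⟩ := hi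
    rw [PySem.List.len_eq] at hi1
    rw [PySem.List.slice_toNat _ hi0 (by omega)]
    simp only [List.length_take, List.length_drop]
    omega
  obtain ⟨hblen, hbget⟩ := b_fold (kmerArray sequence 5) (List.replicate (4 ^ 5) (0:Int)) hlen5 (by simp)
  apply List.ext_getElem
  · rw [List.length_map, length_prodNN, hblen, List.length_replicate]
  · intro j hj1 hj2
    have hjlen : j < 4 ^ 5 := by
      rw [List.length_map, length_prodNN] at hj1
      exact hj1
    rw [List.getElem_map]
    rw [← List.getD_eq_getElem _ 0 hj2, hbget j]
    have hrep : (List.replicate (4 ^ 5) (0:Int)).getD j 0 = 0 := by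
      rw [List.getD_eq_getElem?_getD, List.getElem?_replicate]
      split <;> rfl
    rw [hrep, zero_add]
    have hjq : (prodNN 5)[j]'(by rw [length_prodNN]; exact hjlen) ∈ prodNN 5 := List.getElem_mem _
    have henc : encI ((prodNN 5)[j]'(by rw [length_prodNN]; exact hjlen)) = (j : Int) := by
      have h5 := congrArg (fun l => l[j]?) (map_encI_prodNN 5)
      simp only [List.getElem?_map] at h5
      rw [List.getElem?_eq_getElem (by rw [length_prodNN]; exact hjlen),
        List.getElem?_eq_getElem (by simpa using hjlen)] at h5
      simpa using h5
    refine congrArg List.sum (List.map_congr_left ?_)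
    intro km hkm5
    rw [← henc,
      neigh_count km _ ((hlen5 km hkm5).trans (len_mem_prodNN hjq).symm) (mem_prodNN hjq).2,
      mismatch_count_eq]
    split_ifs <;> omega

-- ===== VERDICT (by name: the statement is the Claim_ definition above) =====
theorem Mismatch_spec : Claim_equal_Mismatch := by
  intro sequence_list _
  show Mismatch sequence_list = Mismatch_alt sequence_list
  unfold Mismatch Mismatch_alt
  simp only [PySem.List.foldl_append_singleton_eq_map, List.nil_append]
  exact List.map_congr_left (fun elem _ => row_eq elem.toList)
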